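-- pv_equiv track=rewrite | github.com/rohithgowdax/Chempanion | cdxml_converter/renderer.py | _split_label_segments
-- ===== SOURCE A (Python) =====
-- def _split_label_segments(text: str) -> list:
--     """Split atom label text into (text, is_digit) segments.
--
--     E.g. 'NH2' -> [('NH', False), ('2', True)]
--          'CH3' -> [('CH', False), ('3', True)]
--          'OH'  -> [('OH', False)]
--     """
--     segments = []
--     current = ''
--     current_is_digit = False
--
--     for ch in text:
--         is_d = ch.isdigit()
--         if current and is_d != current_is_digit:
--             segments.append((current, current_is_digit))
--             current = ''
--         current += ch
--         current_is_digit = is_d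
--
--     if current:
--         segments.append((current, current_is_digit))
--
--     return segments
-- ===== SOURCE B (Python) =====
-- def _split_label_segments(text: str) -> list:
--     """Split atom label text into (text, is_digit) segments.
--
--     Two-pointer run scanner: for each run start, advance j while the
--     digit-ness matches, then slice the whole run out at once.
--     """
--     segments = []
--     i, n = 0, len(text)
--     while i < n:
--         k = text[i].isdigit()
--         j = i + 1
--         while j < n and text[j].isdigit() == k:
--             j += 1
--         segments.append((text[i:j], k))
--         i = j
--     return segments
-- ===== Notes on version B (the rewrite author's own statement) =====
-- stated objective: alternative
-- what changed: Replaced the per-character accumulator state machine (current buffer + current_is_digit flag with a boundary branch and a trailing flush) by a two-pointer run scanner that finds each maximal digit/non-digit run and slices it out in one step.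
import Mathlib
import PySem

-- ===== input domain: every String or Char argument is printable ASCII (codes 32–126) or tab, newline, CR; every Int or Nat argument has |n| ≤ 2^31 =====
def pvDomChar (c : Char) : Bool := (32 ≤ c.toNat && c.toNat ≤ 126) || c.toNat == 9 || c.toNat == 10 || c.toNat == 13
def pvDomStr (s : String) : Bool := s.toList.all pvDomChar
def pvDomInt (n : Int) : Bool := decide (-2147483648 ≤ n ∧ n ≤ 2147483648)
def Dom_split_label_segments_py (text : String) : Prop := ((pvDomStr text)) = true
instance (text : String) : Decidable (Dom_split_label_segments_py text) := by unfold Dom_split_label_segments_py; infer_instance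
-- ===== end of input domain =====

-- B replaces A's per-character accumulator state machine by a two-pointer run scanner
-- that takes each maximal digit/non-digit run in one step (objective: alternative).

-- ===== PORT A =====
-- A's loop state: segments so far, the current run buffer (as List Char, built left-to-right
-- exactly like Python's `current += ch`), and current_is_digit.
def pvALoop : List Char → List (String × Bool) → List Char → Bool → List (String × Bool)
  | [], segments, current, cid =>
      if current ≠ [] then segments ++ [(String.ofList current, cid)] else segments
  | ch :: rest, segments, current, cid =>
      let is_d := PySem.Chars.isdigit ch
      if current ≠ [] ∧ is_d ≠ cid then
        pvALoop rest (segments ++ [(String.ofList current, cid)]) [ch] is_d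
      else
        pvALoop rest segments (current ++ [ch]) is_d

def split_label_segments_py (text : String) : List (String × Bool) :=
  pvALoop text.toList [] [] false

-- ===== PORT B =====
-- Each step takes one maximal run (takeWhile/dropWhile = the inner `while j < n and …` scan
-- plus the slice text[i:j]).
def pvBRuns : List Char → List (String × Bool)
  | [] => []
  | c :: rest =>
      let k := PySem.Chars.isdigit c
      (String.ofList (c :: rest.takeWhile (fun d => PySem.Chars.isdigit d == k)), k)
        :: pvBRuns (rest.dropWhile (fun d => PySem.Chars.isdigit d == k))
termination_by cs => cs.length
decreasing_by
  exact Nat.lt_succ_of_le (List.length_dropWhile_le _ _)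

def split_label_segments_py_alt (text : String) : List (String × Bool) :=
  pvBRuns text.toList

-- ===== PRECONDITION & SPEC =====
def Spec_split_label_segments_py (text : String) (out : List (String × Bool)) : Prop := out = split_label_segments_py_alt text
instance (text : String) (out : List (String × Bool)) : Decidable (Spec_split_label_segments_py text out) := by unfold Spec_split_label_segments_py; infer_instance

-- ===== CLAIM (what is proved, stated in full; the proofs are below) =====
def Claim_equal_split_label_segments_py : Prop := ∀ (text : String), Dom_split_label_segments_py text → Spec_split_label_segments_py text (split_label_segments_py text)

-- ===== LEMMAS AND PROOFS =====

theorem pvBRuns_nil : pvBRuns [] = [] := by rw [pvBRuns.eq_def]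

theorem pvBRuns_cons (c : Char) (rest : List Char) :
    pvBRuns (c :: rest) =
      (String.ofList (c :: rest.takeWhile (fun d => PySem.Chars.isdigit d == PySem.Chars.isdigit c)), PySem.Chars.isdigit c)
        :: pvBRuns (rest.dropWhile (fun d => PySem.Chars.isdigit d == PySem.Chars.isdigit c)) := by
  rw [pvBRuns.eq_def]

-- Once the current buffer is nonempty, A's loop emits exactly: the current run extended by
-- the maximal same-key prefix of cs, followed by B's runs of the remainder.
theorem pvALoop_run (cs : List Char) : ∀ (segs : List (String × Bool)) (cur : List Char) (k : Bool),
    cur ≠ [] →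
    pvALoop cs segs cur k =
      segs ++ (String.ofList (cur ++ cs.takeWhile (fun d => PySem.Chars.isdigit d == k)), k)
        :: pvBRuns (cs.dropWhile (fun d => PySem.Chars.isdigit d == k)) := by
  induction cs with
  | nil =>
      intro segs cur k hcur
      simp [pvALoop, hcur, pvBRuns_nil]
  | cons c rest ih =>
      intro segs cur k hcur
      by_cases hk : PySem.Chars.isdigit c = k
      · -- same key: c joins the current run
        have : ¬ (cur ≠ [] ∧ PySem.Chars.isdigit c ≠ k) := by simp [hk]
        simp only [pvALoop, this]
        rw [ih segs (cur ++ [c]) (PySem.Chars.isdigit c) (by simp)]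
        simp [hk]
      · -- key changes: flush the current run, start a fresh one with c
        have hcond : cur ≠ [] ∧ PySem.Chars.isdigit c ≠ k := ⟨hcur, hk⟩
        simp only [pvALoop, if_pos hcond]
        rw [ih (segs ++ [(String.ofList cur, k)]) [c] (PySem.Chars.isdigit c) (by simp)]
        have hpk : (PySem.Chars.isdigit c == k) = false := by simp [hk]
        simp only [List.takeWhile_cons, List.dropWhile_cons, hpk, Bool.false_eq_true,
          if_false]
        rw [pvBRuns_cons]
        simp

-- ===== VERDICT (by name: the statement is the Claim_ definition above) =====
theorem split_label_segments_py_spec : Claim_equal_split_label_segments_py := by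
  intro text _
  unfold Spec_split_label_segments_py split_label_segments_py split_label_segments_py_alt
  cases h : text.toList with
  | nil => simp [pvALoop, pvBRuns_nil]
  | cons c rest =>
      have hne : ¬ (([] : List Char) ≠ [] ∧ PySem.Chars.isdigit c ≠ false) := by simp
      simp only [pvALoop, if_neg hne, List.nil_append]
      rw [pvALoop_run rest [] [c] (PySem.Chars.isdigit c) (by simp)]
      rw [pvBRuns_cons]
      simp
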